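-- pv_equiv track=rewrite | github.com/thisIsJooS/Algorithm-Problem-Solving | BOJ/20327.py | oper8
-- ===== SOURCE A (Python) =====
-- def oper8(arr, l):
--     n = len(arr)
--     new_arr = [[0]*n for _ in range(n)]
--     s = 2**l
--
--     for x in range(0, n, s):
--         for y in range(0, n, s):
--             tmp = []
--             for i in range(s):
--                 row = []
--                 for j in range(s):
--                     row.append(arr[x+i][y+j])
--                 tmp.append(row)
--
--             for i in range(s):
--                 for j in range(s):
--                     new_arr[i+n-s-y][j+x] = tmp[i][j]
--
--     return new_arr
-- ===== SOURCE B (Python) =====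
-- def oper8(arr, l):
--     n = len(arr)
--     s = 2 ** l
--     return [[arr[(C // s) * s + R % s][n - s - (R // s) * s + C % s] for C in range(n)]
--             for R in range(n)]
-- ===== Notes on version B (the rewrite author's own statement) =====
-- stated objective: simpler
-- what changed: A copies each s*s block into a tmp buffer and then scatters the buffer into the destination block with four nested loops; B is a single gather comprehension that, for each output cell, computes the source cell by closed-form index arithmetic (no tmp buffer, no block loops).
import Mathlib
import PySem

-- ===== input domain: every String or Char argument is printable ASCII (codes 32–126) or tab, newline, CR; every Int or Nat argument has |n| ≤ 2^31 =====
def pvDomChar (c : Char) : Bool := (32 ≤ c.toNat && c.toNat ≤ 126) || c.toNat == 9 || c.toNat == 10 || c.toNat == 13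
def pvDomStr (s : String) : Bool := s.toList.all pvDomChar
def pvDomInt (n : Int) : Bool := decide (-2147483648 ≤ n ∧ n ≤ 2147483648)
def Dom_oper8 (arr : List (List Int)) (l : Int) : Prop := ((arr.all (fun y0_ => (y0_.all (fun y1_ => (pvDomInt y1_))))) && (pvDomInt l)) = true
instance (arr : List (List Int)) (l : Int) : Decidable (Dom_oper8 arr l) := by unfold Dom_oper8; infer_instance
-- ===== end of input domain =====

-- B replaces A's scatter (copy each s×s source block into a tmp buffer, then write the buffer
-- into the destination block) by a single gather comprehension that computes, for every output
-- cell, its source cell by closed-form index arithmetic; objective: simpler (no tmp buffer,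
-- no nested block loops), same O(n^2) cost.

-- arr[i][j] read; exact where the indices are in range (Python raises out of range; such
-- inputs are outside Pre_oper8).
def pvReadA (m : List (List Int)) (i j : Nat) : Int := (m.getD i []).getD j 0
-- new_arr[i][j] = v; exact where the indices are in range (out of range Python raises; outside Pre_oper8).
def pvWriteA (m : List (List Int)) (i j : Nat) (v : Int) : List (List Int) :=
  m.modify i (fun row => row.set j v)

-- ===== PORT A =====
-- literal transliteration of A; indices are Nat (all of A's index arithmetic is nonnegative on
-- Pre_oper8); `range(0, n, s)` = List.range' 0 ⌈n/s⌉ s (exact for s > 0); 2**l = 2 ^ l.toNat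
-- (exact for l ≥ 0, required by Pre_oper8 — for l < 0 Python's s is a float and A raises).
def oper8 (arr : List (List Int)) (l : Int) : List (List Int) :=
  let n := arr.length
  let s := 2 ^ l.toNat
  let init := (List.range n).map (fun _ => (List.range n).map (fun _ => (0 : Int)))
  (List.range' 0 ((n + s - 1) / s) s).foldl (fun m x =>
    (List.range' 0 ((n + s - 1) / s) s).foldl (fun m y =>
      let tmp := (List.range s).foldl (fun tmp i =>
        tmp ++ [(List.range s).foldl (fun row j => row ++ [pvReadA arr (x + i) (y + j)]) []]) []
      (List.range s).foldl (fun m i =>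
        (List.range s).foldl (fun m j =>
          pvWriteA m (i + n - s - y) (j + x) (pvReadA tmp i j)) m) m) m) init

-- ===== PORT B =====
-- literal transliteration of Source B: one gather comprehension; output cell (R, C) reads
-- source cell (C//s*s + R%s, n - s - R//s*s + C%s).
def oper8_alt (arr : List (List Int)) (l : Int) : List (List Int) :=
  let n := arr.length
  let s := 2 ^ l.toNat
  (List.range n).map (fun R => (List.range n).map (fun C =>
    pvReadA arr (C / s * s + R % s) (n - s - R / s * s + C % s)))

-- ===== PRECONDITION & SPEC =====
-- Exactly the inputs where Python A returns: l ≥ 0 (for l < 0 s = 2**l is a float and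
-- range(0, n, s) raises TypeError), the block size 2^l divides n, and every row has at least
-- n entries (otherwise some arr[x+i][y+j] raises IndexError). The `arr = [] ∨` disjunct is
-- not a narrowing (an empty arr satisfies the right-hand conjuncts vacuously); it only lets
-- the Decidable instance answer without computing 2^l for huge l.
def Pre_oper8 (arr : List (List Int)) (l : Int) : Prop :=
  0 ≤ l ∧ (arr = [] ∨ (2 ^ l.toNat ∣ arr.length ∧ ∀ row ∈ arr, arr.length ≤ row.length))
instance (arr : List (List Int)) (l : Int) : Decidable (Pre_oper8 arr l) := by
  unfold Pre_oper8; infer_instance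

def pvWitness_oper8 : List (List Int) × Int := ([[1, 2], [3, 4]], 1)

def Spec_oper8 (arr : List (List Int)) (l : Int) (out : List (List Int)) : Prop := out = oper8_alt arr l
instance (arr : List (List Int)) (l : Int) (out : List (List Int)) : Decidable (Spec_oper8 arr l out) := by unfold Spec_oper8; infer_instance

-- ===== CLAIM (what is proved, stated in full; the proofs are below) =====
def Claim_equal_oper8 : Prop := ∀ (arr : List (List Int)) (l : Int), Dom_oper8 arr l → Pre_oper8 arr l → Spec_oper8 arr l (oper8 arr l)

-- ===== LEMMAS AND PROOFS =====

def pvShape (m : List (List Int)) (n : Nat) : Prop :=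
  m.length = n ∧ ∀ (k : Nat) (h : k < m.length), (m[k]).length = n

lemma pv_read_eq_getElem (m : List (List Int)) (R C : Nat) (hR : R < m.length)
    (hC : C < (m[R]).length) : pvReadA m R C = m[R][C] := by
  simp [pvReadA, List.getD, hR, hC]

lemma pv_push {α β : Type} (L : List α) (f : α → β) (a : List β) :
    L.foldl (fun acc k => acc ++ [f k]) a = a ++ L.map f := by
  induction L generalizing a with
  | nil => simp
  | cons x xs ih => simp [ih]

lemma pv_read_grid (f : Nat → Nat → Int) (a b i j : Nat) (hi : i < a) (hj : j < b) :
    pvReadA ((List.range a).map fun i => (List.range b).map (f i)) i j = f i j := by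
  simp [pvReadA, List.getD, hi, hj]

lemma pv_shape_write (m : List (List Int)) (n i j : Nat) (v : Int) (hm : pvShape m n) :
    pvShape (pvWriteA m i j v) n := by
  obtain ⟨h1, h2⟩ := hm
  refine ⟨by simpa [pvWriteA] using h1, ?_⟩
  intro k hk
  have hk' : k < m.length := by simpa [pvWriteA] using hk
  show (List.modify m i (fun row => row.set j v))[k].length = n
  rw [List.getElem_modify]
  split
  · simpa using h2 k hk'
  · exact h2 k hk'

lemma pv_read_write (m : List (List Int)) (n : Nat) (hm : pvShape m n) (i j : Nat)
    (hi : i < n) (hj : j < n) (v : Int) (R C : Nat) :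
    pvReadA (pvWriteA m i j v) R C = if R = i ∧ C = j then v else pvReadA m R C := by
  obtain ⟨h1, h2⟩ := hm
  have hil : i < m.length := h1 ▸ hi
  simp only [pvReadA, pvWriteA, List.getD, List.getElem?_modify]
  by_cases hR : R = i
  · subst hR
    simp only [if_pos rfl, List.getElem?_eq_getElem hil, Option.map_some]
    by_cases hC : C = j
    · subst hC
      simp [List.getElem?_set, h2 R hil, hj]
    · simp [List.getElem?_set, hC, Ne.symm hC]
  · simp [Ne.symm hR, hR]

lemma pv_rowWrite (n : Nat) (t : Nat → Nat → Int) (r0 c0 : Nat) (k : Nat)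
    (m : List (List Int)) (hm : pvShape m n) (i : Nat) (hr : i + r0 < n) (hc : c0 + k ≤ n) :
    pvShape ((List.range k).foldl (fun m j => pvWriteA m (i + r0) (j + c0) (t i j)) m) n ∧
    ∀ R C, pvReadA ((List.range k).foldl (fun m j => pvWriteA m (i + r0) (j + c0) (t i j)) m) R C
      = if R = i + r0 ∧ c0 ≤ C ∧ C < c0 + k then t i (C - c0) else pvReadA m R C := by
  induction k with
  | zero => refine ⟨hm, ?_⟩; intro R C; simp
  | succ k ih =>
    obtain ⟨ihS, ihR⟩ := ih (by omega)
    rw [List.range_succ, List.foldl_append]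
    simp only [List.foldl_cons, List.foldl_nil]
    refine ⟨pv_shape_write _ _ _ _ _ ihS, ?_⟩
    intro R C
    rw [pv_read_write _ n ihS _ _ hr (by omega) _ R C, ihR R C]
    split_ifs with h1 h2 h3 h4 h5 <;> try rfl
    · obtain ⟨rfl, rfl⟩ := h1; simp
    · omega
    · omega
    · omega

lemma pv_blockWrite (n s : Nat) (t : Nat → Nat → Int) (r0 c0 : Nat) (k : Nat) (hk : k ≤ s)
    (m : List (List Int)) (hm : pvShape m n) (hr : r0 + s ≤ n) (hc : c0 + s ≤ n) :
    pvShape ((List.range k).foldl (fun m i =>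
      (List.range s).foldl (fun m j => pvWriteA m (i + r0) (j + c0) (t i j)) m) m) n ∧
    ∀ R C, pvReadA ((List.range k).foldl (fun m i =>
      (List.range s).foldl (fun m j => pvWriteA m (i + r0) (j + c0) (t i j)) m) m) R C
      = if r0 ≤ R ∧ R < r0 + k ∧ c0 ≤ C ∧ C < c0 + s then t (R - r0) (C - c0)
        else pvReadA m R C := by
  induction k with
  | zero => refine ⟨hm, ?_⟩; intro R C; simp; omega
  | succ k ih =>
    obtain ⟨ihS, ihR⟩ := ih (by omega)
    rw [List.range_succ, List.foldl_append]
    simp only [List.foldl_cons, List.foldl_nil]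
    obtain ⟨rowS, rowR⟩ := pv_rowWrite n t r0 c0 s _ ihS k (by omega) hc
    refine ⟨rowS, ?_⟩
    intro R C
    rw [rowR R C, ihR R C]
    split_ifs with h1 h2 h3 h4 h5 <;> try rfl
    · obtain ⟨rfl, _⟩ := h1; congr 1 <;> omega
    · omega
    · omega
    · omega

def pvG (arr : List (List Int)) (n s R C : Nat) : Int :=
  pvReadA arr (C / s * s + R % s) (n - s - R / s * s + C % s)

def pvBlockOp (arr : List (List Int)) (n s x y : Nat) (m : List (List Int)) : List (List Int) :=
  let tmp := (List.range s).foldl (fun tmp i =>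
    tmp ++ [(List.range s).foldl (fun row j => row ++ [pvReadA arr (x + i) (y + j)]) []]) []
  (List.range s).foldl (fun m i =>
    (List.range s).foldl (fun m j =>
      pvWriteA m (i + n - s - y) (j + x) (pvReadA tmp i j)) m) m

lemma pv_div_block (s a C : Nat) (hs : 0 < s) (h1 : s * a ≤ C) (h2 : C < s * a + s) :
    C / s = a ∧ C % s = C - s * a := by
  have hd : C / s = a := Nat.div_eq_of_lt_le (by rw [Nat.mul_comm]; omega) (by rw [Nat.add_mul, Nat.one_mul, Nat.mul_comm]; omega)
  have := Nat.div_add_mod C s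
  rw [hd] at this
  exact ⟨hd, by omega⟩

lemma pv_cover (arr : List (List Int)) (n s R C x y : Nat) (hs : 0 < s) (hdn : s ∣ n)
    (hx : s ∣ x) (hxn : x + s ≤ n) (hy : s ∣ y) (hyn : y + s ≤ n)
    (hR1 : n - s - y ≤ R) (hR2 : R < n - s - y + s) (hC1 : x ≤ C) (hC2 : C < x + s) :
    x + (R - (n - s - y)) = C / s * s + R % s ∧ y + (C - x) = n - s - R / s * s + C % s := by
  obtain ⟨a, rfl⟩ := hx
  have hb : s ∣ (n - s - y) := Nat.dvd_sub (Nat.dvd_sub hdn dvd_rfl) hy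
  obtain ⟨b, hbe⟩ := hb
  obtain ⟨hC3, hC4⟩ := pv_div_block s a C hs hC1 (by omega)
  obtain ⟨hR3, hR4⟩ := pv_div_block s b R hs (by omega) (by omega)
  rw [hC3, hR3, hC4, hR4]
  obtain ⟨q, hq⟩ := hdn
  have h1 : a * s = s * a := Nat.mul_comm a s
  have h2 : b * s = s * b := Nat.mul_comm b s
  omega

lemma pv_block (arr : List (List Int)) (n s x y : Nat) (hs : 0 < s) (hn : arr.length = n)
    (hdn : s ∣ n) (hx : s ∣ x) (hxn : x + s ≤ n) (hy : s ∣ y) (hyn : y + s ≤ n)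
    (m : List (List Int)) (hm : pvShape m n) :
    pvShape (pvBlockOp arr n s x y m) n ∧
    ∀ R C, pvReadA (pvBlockOp arr n s x y m) R C
      = if n - s - y ≤ R ∧ R < n - s - y + s ∧ x ≤ C ∧ C < x + s then pvG arr n s R C
        else pvReadA m R C := by
  have htmp : ((List.range s).foldl (fun tmp i =>
      tmp ++ [(List.range s).foldl (fun row j => row ++ [pvReadA arr (x + i) (y + j)]) []]) [])
      = (List.range s).map (fun i => (List.range s).map (fun j => pvReadA arr (x + i) (y + j))) := by
    rw [pv_push]
    simp only [List.nil_append]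
    refine List.map_congr_left ?_
    intro i _
    rw [pv_push, List.nil_append]
  unfold pvBlockOp
  rw [htmp]
  have harith : ∀ i : Nat, i + n - s - y = i + (n - s - y) := fun i => by omega
  simp only [harith]
  obtain ⟨bS, bR⟩ := pv_blockWrite n s
    (fun i j => pvReadA ((List.range s).map (fun i => (List.range s).map (fun j => pvReadA arr (x + i) (y + j)))) i j)
    (n - s - y) x s le_rfl m hm (by omega) (by omega)
  refine ⟨bS, ?_⟩
  intro R C
  rw [bR R C]
  split_ifs with h1
  · -- covered: convert grid read to pvG
    obtain ⟨c1, c2, c3, c4⟩ := h1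
    rw [pv_read_grid _ s s _ _ (by omega) (by omega)]
    obtain ⟨e1, e2⟩ := pv_cover arr n s R C x y hs hdn hx hxn hy hyn c1 c2 c3 c4
    rw [pvG, e1.symm, e2.symm]
  · rfl

lemma pv_yfold (arr : List (List Int)) (n s x : Nat) (hs : 0 < s) (hn : arr.length = n)
    (hdn : s ∣ n) (hx : s ∣ x) (hxn : x + s ≤ n)
    (ys : List Nat) (hys : ∀ y ∈ ys, s ∣ y ∧ y + s ≤ n)
    (m : List (List Int)) (hm : pvShape m n) :
    pvShape (ys.foldl (fun m y => pvBlockOp arr n s x y m) m) n ∧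
    ∀ R C,
      ((∃ y ∈ ys, n - s - y ≤ R ∧ R < n - s - y + s) ∧ x ≤ C ∧ C < x + s →
        pvReadA (ys.foldl (fun m y => pvBlockOp arr n s x y m) m) R C = pvG arr n s R C) ∧
      (¬ ((∃ y ∈ ys, n - s - y ≤ R ∧ R < n - s - y + s) ∧ x ≤ C ∧ C < x + s) →
        pvReadA (ys.foldl (fun m y => pvBlockOp arr n s x y m) m) R C = pvReadA m R C) := by
  induction ys generalizing m with
  | nil => exact ⟨hm, fun R C => ⟨fun h => by simp at h, fun _ => by simp⟩⟩
  | cons y ys ih =>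
    obtain ⟨hy1, hy2⟩ := hys y (by simp)
    obtain ⟨blkS, blkR⟩ := pv_block arr n s x y hs hn hdn hx hxn hy1 hy2 m hm
    obtain ⟨ihS, ihR⟩ := ih (fun y hy => hys y (by simp [hy])) (pvBlockOp arr n s x y m) blkS
    simp only [List.foldl_cons]
    refine ⟨ihS, ?_⟩
    intro R C
    constructor
    · rintro ⟨⟨y', hy', hr1, hr2⟩, hc1, hc2⟩
      rcases List.mem_cons.1 hy' with rfl | htl
      · by_cases htail : (∃ y ∈ ys, n - s - y ≤ R ∧ R < n - s - y + s) ∧ x ≤ C ∧ C < x + s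
        · exact (ihR R C).1 htail
        · rw [(ihR R C).2 htail, blkR R C, if_pos ⟨hr1, hr2, hc1, hc2⟩]
      · exact (ihR R C).1 ⟨⟨y', htl, hr1, hr2⟩, hc1, hc2⟩
    · intro hnc
      have htail : ¬ ((∃ y ∈ ys, n - s - y ≤ R ∧ R < n - s - y + s) ∧ x ≤ C ∧ C < x + s) := by
        intro ⟨⟨y', hy', hr⟩, hc⟩
        exact hnc ⟨⟨y', by simp [hy'], hr⟩, hc⟩
      rw [(ihR R C).2 htail, blkR R C, if_neg ?_]
      intro ⟨hr1, hr2, hc1, hc2⟩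
      exact hnc ⟨⟨y, by simp, hr1, hr2⟩, hc1, hc2⟩

lemma pv_xfold (arr : List (List Int)) (n s : Nat) (hs : 0 < s) (hn : arr.length = n)
    (hdn : s ∣ n)
    (xs : List Nat) (hxs : ∀ x ∈ xs, s ∣ x ∧ x + s ≤ n)
    (Y : List Nat) (hY : ∀ y ∈ Y, s ∣ y ∧ y + s ≤ n)
    (m : List (List Int)) (hm : pvShape m n) :
    pvShape (xs.foldl (fun m x => Y.foldl (fun m y => pvBlockOp arr n s x y m) m) m) n ∧
    ∀ R C,
      ((∃ x ∈ xs, x ≤ C ∧ C < x + s) ∧ (∃ y ∈ Y, n - s - y ≤ R ∧ R < n - s - y + s) →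
        pvReadA (xs.foldl (fun m x => Y.foldl (fun m y => pvBlockOp arr n s x y m) m) m) R C = pvG arr n s R C) ∧
      (¬ ((∃ x ∈ xs, x ≤ C ∧ C < x + s) ∧ (∃ y ∈ Y, n - s - y ≤ R ∧ R < n - s - y + s)) →
        pvReadA (xs.foldl (fun m x => Y.foldl (fun m y => pvBlockOp arr n s x y m) m) m) R C = pvReadA m R C) := by
  induction xs generalizing m with
  | nil => exact ⟨hm, fun R C => ⟨fun h => by simp at h, fun _ => by simp⟩⟩
  | cons x xs ih =>
    obtain ⟨hx1, hx2⟩ := hxs x (by simp)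
    obtain ⟨yS, yR⟩ := pv_yfold arr n s x hs hn hdn hx1 hx2 Y hY m hm
    obtain ⟨ihS, ihR⟩ := ih (fun x hx => hxs x (by simp [hx])) _ yS
    simp only [List.foldl_cons]
    refine ⟨ihS, ?_⟩
    intro R C
    constructor
    · rintro ⟨⟨x', hx', hc1, hc2⟩, hrow⟩
      rcases List.mem_cons.1 hx' with rfl | htl
      · by_cases htail : (∃ x ∈ xs, x ≤ C ∧ C < x + s) ∧ (∃ y ∈ Y, n - s - y ≤ R ∧ R < n - s - y + s)
        · exact (ihR R C).1 htail
        · rw [(ihR R C).2 htail]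
          exact (yR R C).1 ⟨hrow.imp (fun y h => ⟨h.1, h.2⟩), hc1, hc2⟩
      · exact (ihR R C).1 ⟨⟨x', htl, hc1, hc2⟩, hrow⟩
    · intro hnc
      have htail : ¬ ((∃ x ∈ xs, x ≤ C ∧ C < x + s) ∧ (∃ y ∈ Y, n - s - y ≤ R ∧ R < n - s - y + s)) := by
        intro ⟨⟨x', hx', hc⟩, hr⟩
        exact hnc ⟨⟨x', by simp [hx'], hc⟩, hr⟩
      rw [(ihR R C).2 htail]
      refine (yR R C).2 ?_
      intro ⟨hrow, hc1, hc2⟩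
      exact hnc ⟨⟨x, by simp, hc1, hc2⟩, hrow⟩

lemma pv_ceil (n s : Nat) (hs : 0 < s) (hdn : s ∣ n) : (n + s - 1) / s = n / s := by
  obtain ⟨q, rfl⟩ := hdn
  have h1 : (s * q + (s - 1)) / s = q + (s - 1) / s := Nat.mul_add_div hs q (s - 1)
  have h2 : (s - 1) / s = 0 := Nat.div_eq_of_lt (by omega)
  have h3 : s * q / s = q := by rw [Nat.mul_div_cancel_left q hs]
  have h4 : s * q + s - 1 = s * q + (s - 1) := by omega
  rw [h4, h1, h2, h3]
  omega

lemma pv_valid (n s : Nat) (hs : 0 < s) (hdn : s ∣ n) :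
    ∀ z ∈ List.range' 0 (n / s) s, s ∣ z ∧ z + s ≤ n := by
  intro z hz
  obtain ⟨i, hi, rfl⟩ := List.mem_range'.1 hz
  have hsn : s * (n / s) = n := Nat.mul_div_cancel' hdn
  refine ⟨⟨i, by omega⟩, ?_⟩
  have : s * (i + 1) ≤ s * (n / s) := Nat.mul_le_mul_left s (by omega)
  have h2 : s * (i + 1) = s * i + s := by ring
  omega

lemma pv_div_lt (n s C : Nat) (hs : 0 < s) (hdn : s ∣ n) (hC : C < n) : C / s < n / s := by
  by_contra h
  have h1 : n / s ≤ C / s := by omega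
  have h2 : s * (n / s) = n := Nat.mul_div_cancel' hdn
  have h3 : s * (n / s) ≤ s * (C / s) := Nat.mul_le_mul_left s h1
  have h4 : s * (C / s) ≤ C := Nat.mul_div_le C s
  omega

lemma pv_assemble (arr : List (List Int)) (n spow : Nat) (hn : arr.length = n)
    (hs : 0 < spow) (hdvd : spow ∣ n) :
    (List.range' 0 ((n + spow - 1) / spow) spow).foldl (fun m x =>
      (List.range' 0 ((n + spow - 1) / spow) spow).foldl (fun m y => pvBlockOp arr n spow x y m) m)
      ((List.range n).map (fun _ => (List.range n).map (fun _ => (0 : Int))))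
    = (List.range n).map (fun R => (List.range n).map (fun C => pvG arr n spow R C)) := by
  rw [pv_ceil n spow hs hdvd]
  have hshape : pvShape ((List.range n).map (fun _ => (List.range n).map (fun _ => (0 : Int)))) n := by
    refine ⟨by simp, ?_⟩
    intro k hk
    simp at hk
    simp
  obtain ⟨mS, mR⟩ := pv_xfold arr n spow hs hn hdvd
    (List.range' 0 (n / spow) spow) (pv_valid n spow hs hdvd)
    (List.range' 0 (n / spow) spow) (pv_valid n spow hs hdvd)
    _ hshape
  have hcover : ∀ R C, R < n → C < n →
      (∃ x ∈ List.range' 0 (n / spow) spow, x ≤ C ∧ C < x + spow) ∧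
      (∃ y ∈ List.range' 0 (n / spow) spow, n - spow - y ≤ R ∧ R < n - spow - y + spow) := by
    intro R C hR hC
    have hsn : spow * (n / spow) = n := Nat.mul_div_cancel' hdvd
    constructor
    · refine ⟨spow * (C / spow), List.mem_range'.2 ⟨C / spow, pv_div_lt n spow C hs hdvd hC, by omega⟩, ?_, ?_⟩
      · exact Nat.mul_div_le C spow
      · have := Nat.div_add_mod C spow
        have := Nat.mod_lt C hs
        omega
    · have hb : R / spow < n / spow := pv_div_lt n spow R hs hdvd hR
      obtain ⟨q, hq⟩ := hdvd
      have hq' : n / spow = q := by rw [hq, Nat.mul_div_cancel_left q hs]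
      have hdm := Nat.div_add_mod R spow
      have hml := Nat.mod_lt R hs
      rw [hq'] at hb
      generalize hgb : R / spow = b at hb hdm
      generalize hgm : R % spow = rm at hdm hml
      have hsplit : q = (q - 1 - b) + 1 + b := by omega
      have he : spow * q = spow * (q - 1 - b) + spow + spow * b := by
        conv_lhs => rw [hsplit]
        rw [Nat.mul_add, Nat.mul_add, Nat.mul_one]
      generalize hgd : q - 1 - b = d at he
      refine ⟨n - spow - spow * b, List.mem_range'.2 ⟨d, by omega, by omega⟩, by omega, by omega⟩
  refine List.ext_getElem (by rw [mS.1]; simp) ?_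
  intro R h1 h2
  have hRn : R < n := mS.1 ▸ h1
  simp only [List.getElem_map, List.getElem_range]
  refine List.ext_getElem (by rw [mS.2 R h1]; simp) ?_
  intro C g1 g2
  have hCn : C < n := (mS.2 R h1) ▸ g1
  simp only [List.getElem_map, List.getElem_range]
  rw [← pv_read_eq_getElem _ R C h1 g1]
  obtain ⟨cx, cy⟩ := hcover R C hRn hCn
  exact (mR R C).1 ⟨cx, cy⟩

theorem pv_main (arr : List (List Int)) (l : Int)
    (hdvd : 2 ^ l.toNat ∣ arr.length) :
    oper8 arr l = oper8_alt arr l := by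
  have h := pv_assemble arr arr.length (2 ^ l.toNat) rfl (Nat.pow_pos (by omega)) hdvd
  calc oper8 arr l
      = (List.range' 0 ((arr.length + 2 ^ l.toNat - 1) / 2 ^ l.toNat) (2 ^ l.toNat)).foldl (fun m x =>
          (List.range' 0 ((arr.length + 2 ^ l.toNat - 1) / 2 ^ l.toNat) (2 ^ l.toNat)).foldl
            (fun m y => pvBlockOp arr arr.length (2 ^ l.toNat) x y m) m)
          ((List.range arr.length).map (fun _ => (List.range arr.length).map (fun _ => (0 : Int)))) := rfl
    _ = (List.range arr.length).map (fun R => (List.range arr.length).map (fun C =>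
          pvG arr arr.length (2 ^ l.toNat) R C)) := h
    _ = oper8_alt arr l := rfl

-- ===== VERDICT (by name: the statement is the Claim_ definition above) =====
theorem oper8_spec : Claim_equal_oper8 := by
  intro arr l _hdom hpre
  obtain ⟨_hl, hrest⟩ := hpre
  have hdvd : 2 ^ l.toNat ∣ arr.length := by
    rcases hrest with rfl | ⟨h, _⟩
    · simp
    · exact h
  unfold Spec_oper8
  exact pv_main arr l hdvd
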